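-- pv_equiv track=rewrite | github.com/phindagijimana/gene_epi | mushunuri_ilae_pipeline/scripts/04_prepare_gwas_for_magma.py | pick_snp_col
-- ===== SOURCE A (Python) =====
-- def pick_snp_col(cols: list[str]) -> str | None:
--     up = {c: c.upper() for c in cols}
--     for key in (
--         "SNP",
--         "MARKERNAME",
--         "RSID",
--         "ID",
--         "VARIANT_ID",
--     ):
--         for c in cols:
--             if c.upper() == key:
--                 return c
--     return None
-- ===== SOURCE B (Python) =====
-- _RANK = {"SNP": 0, "MARKERNAME": 1, "RSID": 2, "ID": 3, "VARIANT_ID": 4}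
--
-- def pick_snp_col(cols: list[str]) -> str | None:
--     # Single pass over the columns, tracking the best (lowest-rank) match seen so far;
--     # strict improvement means the leftmost column wins among equal ranks.
--     best = None
--     best_rank = len(_RANK)
--     for c in cols:
--         r = _RANK.get(c.upper(), len(_RANK))
--         if r < best_rank:
--             best, best_rank = c, r
--     return best
-- ===== Notes on version B (the rewrite author's own statement) =====
-- stated objective: faster
-- what changed: Inverts the loop nesting: instead of A's outer loop over the five priority keys rescanning (and re-uppercasing) all columns per key, B makes a single pass over the columns keeping a running argmin of each column's priority rank (strict improvement, so the leftmost column wins among equal ranks).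
import Mathlib
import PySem

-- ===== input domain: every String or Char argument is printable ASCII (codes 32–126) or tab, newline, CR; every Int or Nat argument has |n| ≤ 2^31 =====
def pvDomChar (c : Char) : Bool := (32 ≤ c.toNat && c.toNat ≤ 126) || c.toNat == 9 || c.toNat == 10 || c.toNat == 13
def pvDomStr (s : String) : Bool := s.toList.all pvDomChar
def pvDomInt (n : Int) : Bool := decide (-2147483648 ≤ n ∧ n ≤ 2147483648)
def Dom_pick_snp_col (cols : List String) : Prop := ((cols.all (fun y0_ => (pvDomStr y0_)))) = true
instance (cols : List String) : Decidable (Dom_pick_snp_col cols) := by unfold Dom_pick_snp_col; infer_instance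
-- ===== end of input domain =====

-- B inverts the loop nesting: one pass over the columns keeping a running argmin of each
-- column's priority rank, instead of A's outer loop over the keys rescanning the columns.

-- ===== PORT A =====
-- outer loop of A over the priority keys; inner loop = first column whose upper equals key
def pick_snp_col_loopA (cols : List String) : List String → Option String
  | [] => none
  | k :: ks =>
    match cols.find? (fun c => PySem.Str.upper c == k) with
    | some c => some c
    | none => pick_snp_col_loopA cols ks

def pick_snp_col (cols : List String) : Option String :=
  let _up : PySem.Dict String String :=
    PySem.Dict.ofList (cols.map (fun c => (c, PySem.Str.upper c)))  -- A builds this dict and never uses it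
  pick_snp_col_loopA cols ["SNP", "MARKERNAME", "RSID", "ID", "VARIANT_ID"]

-- ===== PORT B =====
def snpRankDict : PySem.Dict String Nat :=
  PySem.Dict.ofList [("SNP", 0), ("MARKERNAME", 1), ("RSID", 2), ("ID", 3), ("VARIANT_ID", 4)]

def snpStep (st : Option String × Nat) (c : String) : Option String × Nat :=
  let r := snpRankDict.getD (PySem.Str.upper c) snpRankDict.size
  if r < st.2 then (some c, r) else st

def pick_snp_col_alt (cols : List String) : Option String :=
  (cols.foldl snpStep (none, snpRankDict.size)).1

-- ===== PRECONDITION & SPEC =====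
def Spec_pick_snp_col (cols : List String) (out : Option String) : Prop := out = pick_snp_col_alt cols
instance (cols : List String) (out : Option String) : Decidable (Spec_pick_snp_col cols out) := by unfold Spec_pick_snp_col; infer_instance

-- ===== CLAIM (what is proved, stated in full; the proofs are below) =====
def Claim_equal_pick_snp_col : Prop := ∀ (cols : List String), Dom_pick_snp_col cols → Spec_pick_snp_col cols (pick_snp_col cols)

-- ===== LEMMAS AND PROOFS =====

-- generic argmin fold over a rank function
def rankStep (rank : String → Nat) (st : Option String × Nat) (c : String) : Option String × Nat :=
  if rank c < st.2 then (some c, rank c) else st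

-- B's step is rankStep for the rank read off the five-key dictionary
theorem snpStep_eq (st : Option String × Nat) (c : String) :
    snpStep st c = rankStep (fun c => snpRankDict.getD (PySem.Str.upper c) snpRankDict.size) st c := rfl

-- the dictionary rank is the index of (upper c) in the key list (length 5 if absent)
theorem snpRankDict_eq_mk :
    snpRankDict = PySem.Dict.mk [("SNP", 0), ("MARKERNAME", 1), ("RSID", 2), ("ID", 3), ("VARIANT_ID", 4)] := by
  decide

theorem snpRank_eq_findIdx (c : String) :
    snpRankDict.getD (PySem.Str.upper c) snpRankDict.size =
      List.findIdx (fun k => PySem.Str.upper c == k) ["SNP", "MARKERNAME", "RSID", "ID", "VARIANT_ID"] := by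
  rw [snpRankDict_eq_mk]
  by_cases h1 : PySem.Str.upper c = "SNP"
  · rw [h1]; decide
  by_cases h2 : PySem.Str.upper c = "MARKERNAME"
  · rw [h2]; decide
  by_cases h3 : PySem.Str.upper c = "RSID"
  · rw [h3]; decide
  by_cases h4 : PySem.Str.upper c = "ID"
  · rw [h4]; decide
  by_cases h5 : PySem.Str.upper c = "VARIANT_ID"
  · rw [h5]; decide
  have g1 : ("SNP" == PySem.Str.upper c) = false := by simp; exact fun h => h1 h.symm
  have g2 : ("MARKERNAME" == PySem.Str.upper c) = false := by simp; exact fun h => h2 h.symm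
  have g3 : ("RSID" == PySem.Str.upper c) = false := by simp; exact fun h => h3 h.symm
  have g4 : ("ID" == PySem.Str.upper c) = false := by simp; exact fun h => h4 h.symm
  have g5 : ("VARIANT_ID" == PySem.Str.upper c) = false := by simp; exact fun h => h5 h.symm
  have f1 : (PySem.Str.upper c == "SNP") = false := by simp [h1]
  have f2 : (PySem.Str.upper c == "MARKERNAME") = false := by simp [h2]
  have f3 : (PySem.Str.upper c == "RSID") = false := by simp [h3]
  have f4 : (PySem.Str.upper c == "ID") = false := by simp [h4]
  have f5 : (PySem.Str.upper c == "VARIANT_ID") = false := by simp [h5]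
  simp [PySem.Dict.getD, PySem.Dict.get?, PySem.Dict.size, List.findIdx_cons,
    g1, g2, g3, g4, g5, f1, f2, f3, f4, f5]

-- a fold whose current best rank is 0 never changes state
theorem fold_rank_zero (rank : String → Nat) (cols : List String) (b : Option String) :
    cols.foldl (rankStep rank) (b, 0) = (b, 0) := by
  induction cols with
  | nil => rfl
  | cons c cs ih => simp [rankStep, ih]

-- if some column has rank 0, the fold returns the first such column
theorem fold_rank_found (rank : String → Nat) (cols : List String) (c0 : String)
    (h : cols.find? (fun c => rank c == 0) = some c0) :
    ∀ (b : Option String) (s : Nat), 0 < s → (cols.foldl (rankStep rank) (b, s)).1 = some c0 := by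
  induction cols with
  | nil => simp at h
  | cons c cs ih =>
    intro b s hs
    by_cases hc : rank c = 0
    · have hco : c0 = c := by
        rw [List.find?_cons_of_pos (by simp [hc])] at h
        exact (Option.some.inj h).symm
      subst hco
      simp only [List.foldl_cons, rankStep, hc, if_pos hs]
      simp [fold_rank_zero]
    · have h' : cs.find? (fun c => rank c == 0) = some c0 := by
        rwa [List.find?_cons_of_neg (by simp [hc])] at h
      simp only [List.foldl_cons, rankStep]
      split
      · exact ih h' _ _ (Nat.pos_of_ne_zero hc)
      · exact ih h' _ _ hs
  
-- if no column has rank 0 on the list, shifting every rank down by one does not change the argmin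
theorem fold_rank_shift (rank₁ rank₂ : String → Nat) (cols : List String)
    (h : ∀ c ∈ cols, rank₁ c = rank₂ c + 1) :
    ∀ (b : Option String) (s : Nat),
      (cols.foldl (rankStep rank₁) (b, s + 1)).1 = (cols.foldl (rankStep rank₂) (b, s)).1 := by
  induction cols with
  | nil => intro b s; rfl
  | cons c cs ih =>
    intro b s
    have hc := h c (List.mem_cons_self ..)
    have hcs : ∀ x ∈ cs, rank₁ x = rank₂ x + 1 := fun x hx => h x (List.mem_cons_of_mem _ hx)
    simp only [List.foldl_cons, rankStep, hc]
    by_cases hlt : rank₂ c < s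
    · rw [if_pos (by omega), if_pos hlt]
      exact ih hcs _ _
    · rw [if_neg (by omega), if_neg hlt]
      exact ih hcs _ _

-- rank with respect to a key list
def ksRank (ks : List String) (c : String) : Nat := List.findIdx (fun k => PySem.Str.upper c == k) ks

-- A's nested loop equals B's argmin fold, for any key list
theorem loopA_eq_fold (ks cols : List String) :
    pick_snp_col_loopA cols ks = (cols.foldl (rankStep (ksRank ks)) (none, ks.length)).1 := by
  induction ks generalizing cols with
  | nil =>
    have : cols.foldl (rankStep (ksRank [])) (none, 0) = (none, 0) := fold_rank_zero _ _ _
    simp [pick_snp_col_loopA, this]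
  | cons k ks ih =>
    simp only [pick_snp_col_loopA]
    cases hf : cols.find? (fun c => PySem.Str.upper c == k) with
    | some c0 =>
      have hfun : (fun c => ksRank (k :: ks) c == 0) = (fun c => PySem.Str.upper c == k) := by
        funext c
        by_cases h : PySem.Str.upper c = k
        · simp [ksRank, List.findIdx_cons, h]
        · have hb : (PySem.Str.upper c == k) = false := by simp [h]
          simp [ksRank, List.findIdx_cons, hb]
      have hz : cols.find? (fun c => ksRank (k :: ks) c == 0) = some c0 := by
        rw [hfun]; exact hf
      rw [fold_rank_found _ _ _ hz _ _ (by simp)]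
    | none =>
      have hnone : ∀ c ∈ cols, ksRank (k :: ks) c = ksRank ks c + 1 := by
        intro c hc
        have hne := List.find?_eq_none.mp hf c hc
        simp only [beq_iff_eq] at hne
        have hb : (PySem.Str.upper c == k) = false := by simp [hne]
        simp [ksRank, List.findIdx_cons, hb]
      rw [List.length_cons, fold_rank_shift _ _ _ hnone, ih]

-- ===== VERDICT (by name: the statement is the Claim_ definition above) =====
theorem pick_snp_col_spec : Claim_equal_pick_snp_col := by
  intro cols _
  unfold Spec_pick_snp_col pick_snp_col pick_snp_col_alt
  rw [loopA_eq_fold]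
  have hstep : snpStep = rankStep (ksRank ["SNP", "MARKERNAME", "RSID", "ID", "VARIANT_ID"]) := by
    funext st c
    rw [snpStep_eq]
    simp only [rankStep]
    rw [snpRank_eq_findIdx]
    rfl
  have hsz : snpRankDict.size = 5 := by decide
  rw [hstep, hsz]
  rfl
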